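-- pv_equiv track=rewrite | github.com/AnnemetteBP/brainsurgery | brainsurgery/synapse/axon/lowering.py | _canonical_op_name
-- ===== SOURCE A (Python) =====
-- _ACTIVATION_KINDS: set[str] = {
--     "gelu",
--     "gelu_new",
--     "gelu_pytorch_tanh",
--     "relu",
--     "silu",
--     "swiglu",
-- }
--
-- def _canonical_op_name(callee: str) -> str:
--     if callee in _ACTIVATION_KINDS:
--         return "activation"
--     if callee.startswith("_act_"):
--         kind = callee[len("_act_") :]
--         if not kind:
--             raise ValueError("invalid primitive activation call: missing kind in _act_*")
--         return "activation"
--     if callee.startswith("_cache_"):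
--         cache_suffix = callee[len("_cache_") :]
--         if cache_suffix == "update":
--             return "kv_cache_update"
--         if cache_suffix == "coalesce":
--             return "coalesce"
--         if cache_suffix == "seq_len":
--             return "kv_seq_len"
--         raise ValueError(f"unsupported cache primitive alias: {callee!r}")
--     if callee == "_repeat":
--         return "repeat_kv"
--     if callee == "_list_init":
--         return "init_list"
--     if callee == "_list_index":
--         return "index"
--     if callee == "_list_append":
--         return "append"
--     if callee == "_moe_select":
--         return "moe_select_tokens"
--     if callee.startswith("_") and len(callee) > 1 and callee[1].isalpha():
--         return _canonical_op_name(callee[1:])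
--     if "@" in callee:
--         op_name = callee.split("@", 1)[0]
--         if op_name == "embed":
--             return "embedding"
--         return op_name
--     if "::" in callee:
--         ns, name = callee.split("::", 1)
--         if ns == "act":
--             return "activation"
--         if ns == "cache" and name == "update":
--             return "kv_cache_update"
--         if ns == "cache" and name == "coalesce":
--             return "coalesce"
--         if ns == "cache" and name == "seq_len":
--             return "kv_seq_len"
--     return callee
-- ===== SOURCE B (Python) =====
-- _EXACT = {
--     "gelu": "activation",
--     "gelu_new": "activation",
--     "gelu_pytorch_tanh": "activation",
--     "relu": "activation",
--     "silu": "activation",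
--     "swiglu": "activation",
--     "_repeat": "repeat_kv",
--     "_list_init": "init_list",
--     "_list_index": "index",
--     "_list_append": "append",
--     "_moe_select": "moe_select_tokens",
--     "_cache_update": "kv_cache_update",
--     "_cache_coalesce": "coalesce",
--     "_cache_seq_len": "kv_seq_len",
-- }
--
-- _NAMESPACED = {
--     ("cache", "update"): "kv_cache_update",
--     ("cache", "coalesce"): "coalesce",
--     ("cache", "seq_len"): "kv_seq_len",
-- }
--
--
-- def _from_separators(callee: str) -> str:
--     if "@" in callee:
--         head = callee.split("@", 1)[0]
--         return "embedding" if head == "embed" else head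
--     if "::" in callee:
--         ns, name = callee.split("::", 1)
--         if ns == "act":
--             return "activation"
--         out = _NAMESPACED.get((ns, name))
--         if out is not None:
--             return out
--     return callee
--
--
-- def _canonical_op_name(callee: str) -> str:
--     out = _EXACT.get(callee)
--     if out is not None:
--         return out
--     if callee.startswith("_act_") and callee != "_act_":
--         return "activation"
--     if len(callee) > 1 and callee[0] == "_" and callee[1].isalpha():
--         callee = callee[1:]
--         out = _EXACT.get(callee)
--         if out is not None:
--             return out
--     return _from_separators(callee)
-- ===== Notes on version B (the rewrite author's own statement) =====
-- stated objective: simpler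
-- what changed: Replaced the long if/elif dispatch chain and the tail recursion with a single lookup table for all exact names (activation kinds, _-primitives and _cache_ aliases), one explicit underscore-strip step instead of the recursive call, and a small (ns,name) table for the :: aliases.
-- outside the precondition, e.g. on _canonical_op_name('_act_'): A raises ValueError, B returns 'act_'; on _canonical_op_name('_cache_'): A raises ValueError, B returns 'cache_'
import Mathlib
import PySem

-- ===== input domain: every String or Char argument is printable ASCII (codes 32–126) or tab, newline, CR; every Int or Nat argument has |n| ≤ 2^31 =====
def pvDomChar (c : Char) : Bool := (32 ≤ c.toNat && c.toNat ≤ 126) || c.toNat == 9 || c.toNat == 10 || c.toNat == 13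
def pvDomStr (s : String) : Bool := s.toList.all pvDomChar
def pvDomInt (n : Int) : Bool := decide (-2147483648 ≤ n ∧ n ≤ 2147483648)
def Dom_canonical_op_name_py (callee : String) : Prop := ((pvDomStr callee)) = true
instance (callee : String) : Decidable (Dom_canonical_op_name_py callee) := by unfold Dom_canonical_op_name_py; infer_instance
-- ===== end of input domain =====

-- B replaces A's long if/elif chain and tail recursion by lookup tables plus one explicit
-- underscore-strip step (objective: simpler). A raises ValueError on '_act_' and on unknown
-- '_cache_*' aliases; those inputs are outside Pre_.

-- ===== PORT A =====
-- A works on callee.toList via PySem.Chars; the two `raise ValueError` paths return [] and are excluded by Pre_.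
def pvActsA : PySem.Set (List Char) := PySem.Set.ofList
  ["gelu".toList, "gelu_new".toList, "gelu_pytorch_tanh".toList,
   "relu".toList, "silu".toList, "swiglu".toList]

def pvCanonA (s : List Char) : List Char :=
  if PySem.Set.contains pvActsA s then "activation".toList
  else if PySem.Chars.startswith s "_act_".toList then
    (if PySem.Chars.slice s (some 5) none = ([] : List Char) then []   -- raise ValueError (outside Pre_)
     else "activation".toList)
  else if PySem.Chars.startswith s "_cache_".toList then
    (let suf := PySem.Chars.slice s (some 7) none
     if suf = "update".toList then "kv_cache_update".toList
     else if suf = "coalesce".toList then "coalesce".toList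
     else if suf = "seq_len".toList then "kv_seq_len".toList
     else [])                                                           -- raise ValueError (outside Pre_)
  else if s = "_repeat".toList then "repeat_kv".toList
  else if s = "_list_init".toList then "init_list".toList
  else if s = "_list_index".toList then "index".toList
  else if s = "_list_append".toList then "append".toList
  else if s = "_moe_select".toList then "moe_select_tokens".toList
  else if hrec : (PySem.Chars.startswith s "_".toList
                  && decide (1 < PySem.Chars.len s)
                  && ((PySem.Chars.pyGet? s 1).elim false PySem.Chars.isalpha)) = true then
    pvCanonA (PySem.Chars.slice s (some 1) none)
  else if PySem.Chars.isIn "@".toList s then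
    (let op := ((PySem.Chars.splitMax? s "@".toList 1).getD []).headD []
     if op = "embed".toList then "embedding".toList else op)
  else if PySem.Chars.isIn "::".toList s then
    (match PySem.Chars.splitMax? s "::".toList 1 with
     | some (ns :: nm :: _) =>
       if ns = "act".toList then "activation".toList
       else if ns = "cache".toList ∧ nm = "update".toList then "kv_cache_update".toList
       else if ns = "cache".toList ∧ nm = "coalesce".toList then "coalesce".toList
       else if ns = "cache".toList ∧ nm = "seq_len".toList then "kv_seq_len".toList
       else s
     | _ => s)
  else s
termination_by s.length
decreasing_by
  simp only [Bool.and_eq_true, decide_eq_true_eq, PySem.Chars.len_eq] at hrec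
  simp only [PySem.Chars.slice_eq_listSlice]
  rw [PySem.List.slice_from _ (by norm_num : (0:Int) ≤ 1)]
  have h1 : 1 < s.length := by exact_mod_cast hrec.1.2
  simp only [List.length_drop]
  omega

def canonical_op_name_py (callee : String) : String := String.mk (pvCanonA callee.toList)

-- ===== PORT B =====
def pvExactB : PySem.Dict (List Char) (List Char) := PySem.Dict.mk
  [("gelu".toList, "activation".toList),
   ("gelu_new".toList, "activation".toList),
   ("gelu_pytorch_tanh".toList, "activation".toList),
   ("relu".toList, "activation".toList),
   ("silu".toList, "activation".toList),
   ("swiglu".toList, "activation".toList),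
   ("_repeat".toList, "repeat_kv".toList),
   ("_list_init".toList, "init_list".toList),
   ("_list_index".toList, "index".toList),
   ("_list_append".toList, "append".toList),
   ("_moe_select".toList, "moe_select_tokens".toList),
   ("_cache_update".toList, "kv_cache_update".toList),
   ("_cache_coalesce".toList, "coalesce".toList),
   ("_cache_seq_len".toList, "kv_seq_len".toList)]

def pvNsB : PySem.Dict (List Char × List Char) (List Char) := PySem.Dict.mk
  [(("cache".toList, "update".toList), "kv_cache_update".toList),
   (("cache".toList, "coalesce".toList), "coalesce".toList),
   (("cache".toList, "seq_len".toList), "kv_seq_len".toList)]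

def pvFromSeparators (s : List Char) : List Char :=
  if PySem.Chars.isIn "@".toList s then
    (let head := ((PySem.Chars.splitMax? s "@".toList 1).getD []).headD []
     if head = "embed".toList then "embedding".toList else head)
  else if PySem.Chars.isIn "::".toList s then
    (match PySem.Chars.splitMax? s "::".toList 1 with
     | some (ns :: nm :: _) =>
       if ns = "act".toList then "activation".toList
       else (match pvNsB.get? (ns, nm) with
             | some out => out
             | none => s)
     | _ => s)
  else s

def pvCanonB (s : List Char) : List Char :=
  match pvExactB.get? s with
  | some out => out
  | none =>
    if PySem.Chars.startswith s "_act_".toList && !(s == "_act_".toList) then "activation".toList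
    else if decide (1 < PySem.Chars.len s)
            && ((PySem.Chars.pyGet? s 0).elim false (· == '_'))
            && ((PySem.Chars.pyGet? s 1).elim false PySem.Chars.isalpha) then
      (let s1 := PySem.Chars.slice s (some 1) none
       match pvExactB.get? s1 with
       | some out => out
       | none => pvFromSeparators s1)
    else pvFromSeparators s

def canonical_op_name_py_alt (callee : String) : String := String.mk (pvCanonB callee.toList)

-- ===== PRECONDITION & SPEC =====
-- Pre_ excludes exactly the inputs on which A raises ValueError: callee == "_act_" and
-- callee starting with "_cache_" whose suffix is not update/coalesce/seq_len.
def Pre_canonical_op_name_py (callee : String) : Prop :=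
  callee.toList ≠ "_act_".toList ∧
  (PySem.Chars.startswith callee.toList "_cache_".toList = true →
    PySem.Chars.slice callee.toList (some 7) none ∈
      (["update".toList, "coalesce".toList, "seq_len".toList] : List (List Char)))
instance (callee : String) : Decidable (Pre_canonical_op_name_py callee) := by
  unfold Pre_canonical_op_name_py; infer_instance

def pvWitness_canonical_op_name_py : String := "_cache_update"

def Spec_canonical_op_name_py (callee : String) (out : String) : Prop :=
  out = canonical_op_name_py_alt callee
instance (callee : String) (out : String) : Decidable (Spec_canonical_op_name_py callee out) := by
  unfold Spec_canonical_op_name_py; infer_instance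

-- ===== CLAIM (what is proved, stated in full; the proofs are below) =====
def Claim_equal_canonical_op_name_py : Prop :=
  ∀ (callee : String), Dom_canonical_op_name_py callee → Pre_canonical_op_name_py callee →
    Spec_canonical_op_name_py callee (canonical_op_name_py callee)

-- ===== LEMMAS AND PROOFS =====


theorem pvStartswithHead (s : List Char) (a : Char) (q : List Char)
    (h : PySem.Chars.startswith s (a :: q) = true) : s.head? = some a := by
  obtain ⟨u, hu⟩ := (PySem.Chars.startswith_iff s _).1 h
  rw [← hu]; rfl

theorem pvExactB_eq (s : List Char) : pvExactB.get? s =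
    if "gelu".toList = s then some "activation".toList
    else if "gelu_new".toList = s then some "activation".toList
    else if "gelu_pytorch_tanh".toList = s then some "activation".toList
    else if "relu".toList = s then some "activation".toList
    else if "silu".toList = s then some "activation".toList
    else if "swiglu".toList = s then some "activation".toList
    else if "_repeat".toList = s then some "repeat_kv".toList
    else if "_list_init".toList = s then some "init_list".toList
    else if "_list_index".toList = s then some "index".toList
    else if "_list_append".toList = s then some "append".toList
    else if "_moe_select".toList = s then some "moe_select_tokens".toList
    else if "_cache_update".toList = s then some "kv_cache_update".toList
    else if "_cache_coalesce".toList = s then some "coalesce".toList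
    else if "_cache_seq_len".toList = s then some "kv_seq_len".toList
    else none := by
  simp only [pvExactB, PySem.Dict.get?_mk_cons, beq_iff_eq]
  rfl

theorem pvExactB_none (s : List Char)
    (k1 : ¬ "gelu".toList = s) (k2 : ¬ "gelu_new".toList = s)
    (k3 : ¬ "gelu_pytorch_tanh".toList = s) (k4 : ¬ "relu".toList = s)
    (k5 : ¬ "silu".toList = s) (k6 : ¬ "swiglu".toList = s)
    (k7 : ¬ "_repeat".toList = s) (k8 : ¬ "_list_init".toList = s)
    (k9 : ¬ "_list_index".toList = s) (k10 : ¬ "_list_append".toList = s)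
    (k11 : ¬ "_moe_select".toList = s) (k12 : ¬ "_cache_update".toList = s)
    (k13 : ¬ "_cache_coalesce".toList = s) (k14 : ¬ "_cache_seq_len".toList = s) :
    pvExactB.get? s = none := by
  rw [pvExactB_eq, if_neg k1, if_neg k2, if_neg k3, if_neg k4, if_neg k5, if_neg k6,
    if_neg k7, if_neg k8, if_neg k9, if_neg k10, if_neg k11, if_neg k12, if_neg k13, if_neg k14]

theorem pvNsB_eq (p : List Char × List Char) : pvNsB.get? p =
    if ("cache".toList, "update".toList) = p then some "kv_cache_update".toList
    else if ("cache".toList, "coalesce".toList) = p then some "coalesce".toList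
    else if ("cache".toList, "seq_len".toList) = p then some "kv_seq_len".toList
    else none := by
  simp only [pvNsB, PySem.Dict.get?_mk_cons, beq_iff_eq]
  rfl

theorem pvSep_eq (s : List Char) :
    (if PySem.Chars.isIn "@".toList s then
      (let op := ((PySem.Chars.splitMax? s "@".toList 1).getD []).headD []
       if op = "embed".toList then "embedding".toList else op)
    else if PySem.Chars.isIn "::".toList s then
      (match PySem.Chars.splitMax? s "::".toList 1 with
       | some (ns :: nm :: _) =>
         if ns = "act".toList then "activation".toList
         else if ns = "cache".toList ∧ nm = "update".toList then "kv_cache_update".toList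
         else if ns = "cache".toList ∧ nm = "coalesce".toList then "coalesce".toList
         else if ns = "cache".toList ∧ nm = "seq_len".toList then "kv_seq_len".toList
         else s
       | _ => s)
    else s) = pvFromSeparators s := by
  unfold pvFromSeparators
  by_cases hat : PySem.Chars.isIn "@".toList s = true
  · rw [if_pos hat, if_pos hat]
  · rw [if_neg hat, if_neg hat]
    by_cases hcol : PySem.Chars.isIn "::".toList s = true
    · rw [if_pos hcol, if_pos hcol]
      cases hsp : PySem.Chars.splitMax? s "::".toList 1 with
      | none => rfl
      | some l =>
        match l with
        | [] => rfl
        | [_] => rfl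
        | ns :: nm :: r =>
          dsimp only
          by_cases hns : ns = "act".toList
          · rw [if_pos hns, if_pos hns]
          · rw [if_neg hns, if_neg hns]
            rw [pvNsB_eq]
            split_ifs with e1 e2 e3 e4 e5 e6 <;> simp_all [Prod.ext_iff] <;> tauto
    · rw [if_neg hcol, if_neg hcol]

set_option maxHeartbeats 2000000 in
theorem pvAlphaA (c : Char) (t : List Char) (hc : PySem.Chars.isalpha c = true) :
    pvCanonA (c :: t) =
      (match pvExactB.get? (c :: t) with
       | some out => out
       | none => pvFromSeparators (c :: t)) := by
  have hcu : c ≠ '_' := fun h => by subst h; exact absurd hc (by decide)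
  rw [pvCanonA.eq_def]
  by_cases d1 : PySem.Set.contains pvActsA (c :: t) = true
  · have hm := (PySem.Set.mem_ofList _ _).1 ((PySem.Set.contains_iff pvActsA _).1 d1)
    simp only [List.mem_cons, List.not_mem_nil, or_false] at hm
    rcases hm with h|h|h|h|h|h <;> (rw [h]; decide)
  · rw [if_neg d1]
    have d2 : ¬ PySem.Chars.startswith (c :: t) "_act_".toList = true := fun hh => by
      have := pvStartswithHead (c :: t) '_' "act_".toList hh
      simp only [List.head?_cons, Option.some.injEq] at this
      exact hcu this
    have d3 : ¬ PySem.Chars.startswith (c :: t) "_cache_".toList = true := fun hh => by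
      have := pvStartswithHead (c :: t) '_' "cache_".toList hh
      simp only [List.head?_cons, Option.some.injEq] at this
      exact hcu this
    have dlit : ∀ (q : List Char), ¬ (c :: t = '_' :: q) := fun q e => by
      have := (List.cons.injEq c t '_' q).mp e
      exact hcu this.1
    rw [if_neg d2, if_neg d3,
        if_neg (show ¬ c :: t = "_repeat".toList from dlit "repeat".toList),
        if_neg (show ¬ c :: t = "_list_init".toList from dlit "list_init".toList),
        if_neg (show ¬ c :: t = "_list_index".toList from dlit "list_index".toList),
        if_neg (show ¬ c :: t = "_list_append".toList from dlit "list_append".toList),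
        if_neg (show ¬ c :: t = "_moe_select".toList from dlit "moe_select".toList)]
    have d9 : ¬ (PySem.Chars.startswith (c :: t) "_".toList
                  && decide (1 < PySem.Chars.len (c :: t))
                  && ((PySem.Chars.pyGet? (c :: t) 1).elim false PySem.Chars.isalpha)) = true := by
      intro hh
      simp only [Bool.and_eq_true] at hh
      have := pvStartswithHead (c :: t) '_' [] hh.1.1
      simp only [List.head?_cons, Option.some.injEq] at this
      exact hcu this
    rw [dif_neg d9]
    have hge : pvExactB.get? (c :: t) = none := by
      refine pvExactB_none _ ?_ ?_ ?_ ?_ ?_ ?_ ?_ ?_ ?_ ?_ ?_ ?_ ?_ ?_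
      · intro e; rw [← e] at d1; exact d1 (by decide)
      · intro e; rw [← e] at d1; exact d1 (by decide)
      · intro e; rw [← e] at d1; exact d1 (by decide)
      · intro e; rw [← e] at d1; exact d1 (by decide)
      · intro e; rw [← e] at d1; exact d1 (by decide)
      · intro e; rw [← e] at d1; exact d1 (by decide)
      · exact fun e => dlit "repeat".toList e.symm
      · exact fun e => dlit "list_init".toList e.symm
      · exact fun e => dlit "list_index".toList e.symm
      · exact fun e => dlit "list_append".toList e.symm
      · exact fun e => dlit "moe_select".toList e.symm
      · exact fun e => dlit "cache_update".toList e.symm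
      · exact fun e => dlit "cache_coalesce".toList e.symm
      · exact fun e => dlit "cache_seq_len".toList e.symm
    rw [hge]
    exact pvSep_eq (c :: t)

set_option maxHeartbeats 2000000 in
theorem pvMainList (s : List Char)
    (h1 : s ≠ "_act_".toList)
    (h2 : PySem.Chars.startswith s "_cache_".toList = true →
      PySem.Chars.slice s (some 7) none ∈
        (["update".toList, "coalesce".toList, "seq_len".toList] : List (List Char))) :
    pvCanonA s = pvCanonB s := by
  rw [pvCanonA.eq_def]
  by_cases c1 : PySem.Set.contains pvActsA s = true
  · rw [if_pos c1]
    have hm := (PySem.Set.mem_ofList _ _).1 ((PySem.Set.contains_iff pvActsA _).1 c1)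
    simp only [List.mem_cons, List.not_mem_nil, or_false] at hm
    rcases hm with rfl|rfl|rfl|rfl|rfl|rfl <;> decide
  · rw [if_neg c1]
    by_cases c2 : PySem.Chars.startswith s "_act_".toList = true
    · rw [if_pos c2]
      obtain ⟨t, ht⟩ := (PySem.Chars.startswith_iff s _).1 c2
      have h5 : PySem.Chars.slice s (some 5) none = t := by
        rw [← ht]
        simp only [PySem.Chars.slice_eq_listSlice]
        rw [PySem.List.slice_from _ (by norm_num : (0:Int) ≤ 5)]
        exact List.drop_left' (by decide)
      have htn : t ≠ ([] : List Char) := fun h => h1 (by rw [← ht, h, List.append_nil])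
      rw [h5, if_neg htn]
      have hge : pvExactB.get? s = none := by
        apply pvExactB_none <;> intro e <;> (rw [← e] at c2; exact absurd c2 (by decide))
      have hne : (s == "_act_".toList) = false := beq_eq_false_iff_ne.mpr h1
      unfold pvCanonB
      rw [hge]
      dsimp only
      rw [c2, hne]
      rfl
    · rw [if_neg c2]
      by_cases c3 : PySem.Chars.startswith s "_cache_".toList = true
      · rw [if_pos c3]
        obtain ⟨t, ht⟩ := (PySem.Chars.startswith_iff s _).1 c3
        have h7 : PySem.Chars.slice s (some 7) none = t := by
          rw [← ht]
          simp only [PySem.Chars.slice_eq_listSlice]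
          rw [PySem.List.slice_from _ (by norm_num : (0:Int) ≤ 7)]
          exact List.drop_left' (by decide)
        have hmem := h2 c3
        rw [h7] at hmem
        simp only [List.mem_cons, List.not_mem_nil, or_false] at hmem
        rw [h7]
        rcases hmem with rfl|rfl|rfl <;> (rw [← ht]; decide)
      · rw [if_neg c3]
        by_cases c4 : s = "_repeat".toList
        · subst c4; decide
        · rw [if_neg c4]
          by_cases c5 : s = "_list_init".toList
          · subst c5; decide
          · rw [if_neg c5]
            by_cases c6 : s = "_list_index".toList
            · subst c6; decide
            · rw [if_neg c6]
              by_cases c7 : s = "_list_append".toList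
              · subst c7; decide
              · rw [if_neg c7]
                by_cases c8 : s = "_moe_select".toList
                · subst c8; decide
                · rw [if_neg c8]
                  have hge : pvExactB.get? s = none := by
                    refine pvExactB_none s ?_ ?_ ?_ ?_ ?_ ?_ ?_ ?_ ?_ ?_ ?_ ?_ ?_ ?_
                    · intro e; rw [← e] at c1; exact c1 (by decide)
                    · intro e; rw [← e] at c1; exact c1 (by decide)
                    · intro e; rw [← e] at c1; exact c1 (by decide)
                    · intro e; rw [← e] at c1; exact c1 (by decide)
                    · intro e; rw [← e] at c1; exact c1 (by decide)
                    · intro e; rw [← e] at c1; exact c1 (by decide)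
                    · exact fun e => c4 e.symm
                    · exact fun e => c5 e.symm
                    · exact fun e => c6 e.symm
                    · exact fun e => c7 e.symm
                    · exact fun e => c8 e.symm
                    · intro e; exact c3 (by rw [← e]; decide)
                    · intro e; exact c3 (by rw [← e]; decide)
                    · intro e; exact c3 (by rw [← e]; decide)
                  have hc2f : PySem.Chars.startswith s "_act_".toList = false :=
                    eq_false_of_ne_true c2
                  by_cases c9 : (PySem.Chars.startswith s "_".toList
                                  && decide (1 < PySem.Chars.len s)
                                  && ((PySem.Chars.pyGet? s 1).elim false PySem.Chars.isalpha)) = true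
                  · rw [dif_pos c9]
                    simp only [Bool.and_eq_true] at c9
                    obtain ⟨⟨hsw, hlen⟩, halpha⟩ := c9
                    obtain ⟨u, hu⟩ := (PySem.Chars.startswith_iff s _).1 hsw
                    simp only [decide_eq_true_eq, PySem.Chars.len_eq] at hlen
                    match u, hu with
                    | [], hu => exfalso; rw [← hu] at hlen; simp at hlen
                    | c :: t, hu =>
                      have hs : s = '_' :: c :: t := by rw [← hu]; rfl
                      subst hs
                      have hget1 : PySem.Chars.pyGet? ('_' :: c :: t) 1 = some c := by
                        simp only [PySem.Chars.pyGet?_eq_listPyGet?]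
                        rw [show (1:Int) = ((1:Nat):Int) from rfl, PySem.List.pyGet?_natCast]
                        rfl
                      have hget0 : PySem.Chars.pyGet? ('_' :: c :: t) 0 = some '_' := by
                        simp only [PySem.Chars.pyGet?_eq_listPyGet?]
                        rw [show (0:Int) = ((0:Nat):Int) from rfl, PySem.List.pyGet?_natCast]
                        rfl
                      rw [hget1] at halpha
                      simp only [Option.elim] at halpha
                      have hslice : PySem.Chars.slice ('_' :: c :: t) (some 1) none = c :: t := by
                        simp only [PySem.Chars.slice_eq_listSlice]
                        rw [PySem.List.slice_from _ (by norm_num : (0:Int) ≤ 1)]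
                        rfl
                      rw [hslice, pvAlphaA c t halpha]
                      unfold pvCanonB
                      rw [hge]
                      dsimp only
                      rw [hc2f]
                      have hlen2 : decide (1 < PySem.Chars.len ('_' :: c :: t)) = true := by
                        simp only [decide_eq_true_eq, PySem.Chars.len_eq, List.length_cons]
                        omega
                      rw [hget0, hget1, hlen2]
                      simp only [Option.elim, halpha, Bool.false_and, Bool.and_true,
                        Bool.false_eq_true, if_false]
                      have : (('_' : Char) == '_') = true := rfl
                      rw [this]
                      simp only [Bool.and_self, if_true]
                      rw [hslice]
                  · rw [dif_neg c9]
                    have hcondB : (decide (1 < PySem.Chars.len s)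
                        && ((PySem.Chars.pyGet? s 0).elim false (· == '_'))
                        && ((PySem.Chars.pyGet? s 1).elim false PySem.Chars.isalpha)) = false := by
                      by_contra hne
                      rw [Bool.not_eq_false] at hne
                      simp only [Bool.and_eq_true] at hne
                      obtain ⟨⟨hlen, hz⟩, halpha⟩ := hne
                      simp only [decide_eq_true_eq, PySem.Chars.len_eq] at hlen
                      match s, hlen with
                      | a :: u, hlen =>
                        have hz' : a = '_' := by
                          have hg : PySem.Chars.pyGet? (a :: u) 0 = some a := by
                            simp only [PySem.Chars.pyGet?_eq_listPyGet?]
                            rw [show (0:Int) = ((0:Nat):Int) from rfl, PySem.List.pyGet?_natCast]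
                            rfl
                          rw [hg] at hz
                          simpa using hz
                        apply c9
                        subst hz'
                        simp only [Bool.and_eq_true]
                        refine ⟨⟨?_, by simp only [decide_eq_true_eq, PySem.Chars.len_eq]; exact_mod_cast hlen⟩, halpha⟩
                        rw [PySem.Chars.startswith_iff]
                        exact ⟨u, rfl⟩
                    unfold pvCanonB
                    rw [hge]
                    dsimp only
                    rw [hc2f, hcondB]
                    simp only [Bool.false_and, Bool.false_eq_true, if_false]
                    exact pvSep_eq s

-- ===== VERDICT (by name: the statement is the Claim_ definition above) =====
theorem canonical_op_name_py_spec : Claim_equal_canonical_op_name_py := by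
  intro callee _ hpre
  unfold Spec_canonical_op_name_py canonical_op_name_py canonical_op_name_py_alt
  exact congrArg String.mk (pvMainList callee.toList hpre.1 hpre.2)
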